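-- pv_equiv track=rewrite | github.com/DaroMateo/PROGRAMACION1 | PROGRAMACION1REC/parcial_1/biblioteca.py | buscar_secuencia
-- ===== SOURCE A (Python) =====
-- def buscar_secuencia(matriz, secuencia):
--     """
--     Busca una secuencia numérica en una matriz de manera horizontal.
--
--     Parameters:
--     matriz (list): La matriz a buscar.
--     secuencia (str): La secuencia numérica a buscar.
--
--     Returns:
--     bool: True si la secuencia se encuentra en la matriz, False si no.
--     """
--     for fila in matriz:
--         fila_str = ''
--         for num in fila:
--             fila_str += str(num)
--
--         # Comprobar si la secuencia está en fila_str
--         encontrado = False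
--         for i in range(len(fila_str) - len(secuencia) + 1):
--             if fila_str[i:i + len(secuencia)] == secuencia:
--                 encontrado = True
--                 break
--
--         if encontrado:
--             return True
--     return False
-- ===== SOURCE B (Python) =====
-- def buscar_secuencia(matriz, secuencia):
--     BASE = 1114112            # > any Unicode code point
--     MOD = 2305843009213693951  # 2**61 - 1
--     m = len(secuencia)
--     hp = 0
--     for c in secuencia:
--         hp = (hp * BASE + ord(c)) % MOD
--     pow_top = pow(BASE, m - 1, MOD) if m > 0 else 0
--     for fila in matriz:
--         texto = ''.join(map(str, fila))
--         n = len(texto)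
--         if n < m:
--             continue
--         h = 0
--         for c in texto[:m]:
--             h = (h * BASE + ord(c)) % MOD
--         if h == hp and texto[:m] == secuencia:
--             return True
--         for i in range(m, n):
--             h = ((h - ord(texto[i - m]) * pow_top) * BASE + ord(texto[i])) % MOD
--             if h == hp and texto[i - m + 1:i + 1] == secuencia:
--                 return True
--     return False
-- ===== Notes on version B (the rewrite author's own statement) =====
-- stated objective: alternative
-- what changed: A compares an m-character slice of the row string at every start position; B is a Rabin-Karp search: it precomputes a modular polynomial hash of the pattern (base 1114112, mod 2^61-1) and slides a rolling window hash over each row, comparing the actual characters only at positions where the hashes collide.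
import Mathlib
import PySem

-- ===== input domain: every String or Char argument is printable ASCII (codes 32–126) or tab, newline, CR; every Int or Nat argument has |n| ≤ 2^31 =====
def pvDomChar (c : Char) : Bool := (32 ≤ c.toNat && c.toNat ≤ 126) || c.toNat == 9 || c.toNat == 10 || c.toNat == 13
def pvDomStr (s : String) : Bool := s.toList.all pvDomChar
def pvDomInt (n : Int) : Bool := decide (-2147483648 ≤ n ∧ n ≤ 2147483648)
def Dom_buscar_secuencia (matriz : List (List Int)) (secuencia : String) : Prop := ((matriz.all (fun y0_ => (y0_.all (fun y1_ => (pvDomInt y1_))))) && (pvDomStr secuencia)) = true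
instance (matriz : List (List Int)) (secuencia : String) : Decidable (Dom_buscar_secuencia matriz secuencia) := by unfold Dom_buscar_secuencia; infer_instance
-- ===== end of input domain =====

-- B replaces A's per-position m-character slice comparison by a Rabin–Karp rolling-hash scan
-- (polynomial hash, base 1114112, mod 2^61-1) that compares characters only at positions where
-- the window hash equals the pattern hash; alternative algorithm, return value only.

-- ===== PORT A =====
-- row scan: for i in range(len(fila_str) - len(secuencia) + 1): if fila_str[i:i+len(secuencia)] == secuencia: found = True; break
def buscar_secuencia (matriz : List (List Int)) (secuencia : String) : Bool :=
  matriz.any (fun fila =>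
    let fila_str := fila.foldl (fun acc num => acc ++ PySem.Int.toStr num) ""
    (PySem.List.pyRange 0 (PySem.Str.len fila_str - PySem.Str.len secuencia + 1) 1).any
      (fun i => PySem.Str.slice fila_str (some i) (some (i + PySem.Str.len secuencia)) == secuencia))

-- ===== PORT B =====
-- hp = 0; for c in s: hp = (hp * BASE + ord(c)) % MOD
def pvHashMod (l : List Char) : Int :=
  l.foldl (fun h c => PySem.Int.mod (h * 1114112 + (c.toNat : Int)) 2305843009213693951) 0

-- for i in range(m, n): h = ((h - ord(texto[i-m]) * pow_top) * BASE + ord(texto[i])) % MOD;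
--   if h == hp and texto[i-m+1:i+1] == secuencia: return True
-- (the slice texto[i-m+1:i+1] has bounds 0 ≤ i-m+1 ≤ i+1 ≤ len(texto), so it is exactly
--  (texto.drop (i-m+1)).take m, cf. PySem.List.slice_natCast)
def pvRkGo (texto p : List Char) (hp pow_top : Int) (m : Nat) (i : Nat) (h : Int) : Bool :=
  if hlt : i < texto.length then
    let h' := PySem.Int.mod
      ((h - ((texto.getD (i - m) default).toNat : Int) * pow_top) * 1114112
         + ((texto.getD i default).toNat : Int)) 2305843009213693951
    if h' == hp && ((texto.drop (i - m + 1)).take m == p) then true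
    else pvRkGo texto p hp pow_top m (i + 1) h'
  else false
termination_by texto.length - i

def buscar_secuencia_alt (matriz : List (List Int)) (secuencia : String) : Bool :=
  let m := secuencia.toList.length
  let hp := pvHashMod secuencia.toList
  -- pow(BASE, m-1, MOD) if m > 0 else 0
  let pow_top := if 0 < m then PySem.Int.mod ((1114112 : Int) ^ (m - 1)) 2305843009213693951 else 0
  matriz.any (fun fila =>
    let texto := (PySem.Str.join "" (fila.map PySem.Int.toStr)).toList
    if texto.length < m then false
    else
      let h0 := pvHashMod (texto.take m)
      if h0 == hp && (texto.take m == secuencia.toList) then true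
      else pvRkGo texto secuencia.toList hp pow_top m m h0)

-- ===== PRECONDITION & SPEC =====
def Spec_buscar_secuencia (matriz : List (List Int)) (secuencia : String) (out : Bool) : Prop := out = buscar_secuencia_alt matriz secuencia
instance (matriz : List (List Int)) (secuencia : String) (out : Bool) : Decidable (Spec_buscar_secuencia matriz secuencia out) := by unfold Spec_buscar_secuencia; infer_instance

-- ===== CLAIM (what is proved, stated in full; the proofs are below) =====
def Claim_equal_buscar_secuencia : Prop := ∀ (matriz : List (List Int)) (secuencia : String), Dom_buscar_secuencia matriz secuencia → Spec_buscar_secuencia matriz secuencia (buscar_secuencia matriz secuencia)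

-- ===== LEMMAS AND PROOFS =====

-- ''.join(strings) equals the += accumulation A performs.
theorem pv_foldl_append_toList (l : List String) (acc : String) :
    (l.foldl (fun a s => a ++ s) acc).toList = acc.toList ++ (l.map String.toList).flatten := by
  induction l generalizing acc with
  | nil => simp
  | cons x xs ih => simp [List.foldl_cons, ih]

theorem pv_join_empty_sep (l : List String) :
    PySem.Str.join "" l = l.foldl (fun a s => a ++ s) "" := by
  apply String.ext
  rw [pv_foldl_append_toList, PySem.Str.toList_join]
  simp
  induction l with
  | nil => simp [PySem.Chars.join, List.intercalate]
  | cons x xs ih =>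
    cases xs with
    | nil => simp [PySem.Chars.join, List.intercalate]
    | cons y ys => simp [PySem.Chars.join_cons_cons] at ih ⊢; simp [ih]

-- A's naive sliding-window scan over a row string decides exactly 'secuencia in fila_str'.
theorem pv_row_scan (s sub : String) :
    ((PySem.List.pyRange 0 (PySem.Str.len s - PySem.Str.len sub + 1) 1).any
      (fun i => PySem.Str.slice s (some i) (some (i + PySem.Str.len sub)) == sub))
    = PySem.Str.isIn sub s := by
  rw [Bool.eq_iff_iff]
  rw [List.any_eq_true, PySem.Str.isIn_iff_infix]
  constructor
  · rintro ⟨i, hi, hsl⟩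
    rw [PySem.List.mem_pyRange_iff_of_pos (by norm_num)] at hi
    obtain ⟨hi0, hiub, -⟩ := hi
    obtain ⟨j, rfl⟩ := Int.eq_ofNat_of_zero_le hi0
    rw [beq_iff_eq] at hsl
    have hsl' : (PySem.Str.slice s (some (j:Int)) (some ((j:Int) + PySem.Str.len sub))).toList = sub.toList := by
      rw [hsl]
    rw [PySem.Str.toList_slice] at hsl'
    simp only [PySem.Chars.slice_eq_listSlice, PySem.Str.len] at hsl'
    rw [PySem.List.slice_natCast_add] at hsl'
    refine List.infix_iff_prefix_suffix.mpr ?_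
    · exact ⟨s.toList.drop j, by rw [← hsl']; exact List.take_prefix _ _, List.drop_suffix _ _⟩
  · intro hinf
    obtain ⟨j0, hpre0⟩ := (PySem.Chars.exists_prefix_drop_iff_isIn sub.toList s.toList).mpr
      ((PySem.Chars.isIn_iff_infix _ _).mpr hinf)
    set n := s.toList.length with hn
    set m := sub.toList.length with hm
    have hpre : sub.toList <+: s.toList.drop (min j0 n) := by
      rcases Nat.lt_or_ge n j0 with h | h
      · have : s.toList.drop j0 = [] := List.drop_eq_nil_of_le (by omega)
        rw [this] at hpre0
        have : sub.toList = [] := List.prefix_nil.mp hpre0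
        simp [this]
      · simpa [min_eq_left h] using hpre0
    set j := min j0 n with hj
    have hlen : m ≤ n - j := by
      have := hpre.length_le
      simpa [List.length_drop] using this
    have hjn : j ≤ n := min_le_right _ _
    refine ⟨(j : Int), ?_, ?_⟩
    · rw [PySem.List.mem_pyRange_iff_of_pos (by norm_num)]
      refine ⟨by positivity, ?_, ⟨_, by ring⟩⟩
      simp only [PySem.Str.len]
      omega
    · rw [beq_iff_eq]
      apply String.ext
      rw [PySem.Str.toList_slice]
      simp only [PySem.Chars.slice_eq_listSlice, PySem.Str.len]
      rw [PySem.List.slice_natCast_add]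
      exact (List.prefix_iff_eq_take.mp hpre).symm

-- ---- B-side: correctness of the rolling hash ----

-- the exact (un-modded) polynomial hash, used only as a proof-side invariant
def pvHash (l : List Char) : Int :=
  l.foldl (fun h c => h * 1114112 + (c.toNat : Int)) 0

theorem pv_mod_eq (x : Int) :
    PySem.Int.mod x 2305843009213693951 = x % 2305843009213693951 :=
  PySem.Int.mod_eq_emod_of_pos (by norm_num)

theorem pv_hash_acc (l : List Char) (acc : Int) :
    l.foldl (fun h c => h * 1114112 + (c.toNat : Int)) acc
      = acc * 1114112 ^ l.length + pvHash l := by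
  induction l generalizing acc with
  | nil => simp [pvHash]
  | cons c t ih =>
    unfold pvHash
    simp only [List.foldl_cons, List.length_cons]
    rw [ih (acc * 1114112 + (c.toNat : Int)), ih (0 * 1114112 + (c.toNat : Int))]
    ring

theorem pv_hash_cons (c : Char) (l : List Char) :
    pvHash (c :: l) = (c.toNat : Int) * 1114112 ^ l.length + pvHash l := by
  show List.foldl _ 0 (c :: l) = _
  simp only [List.foldl_cons]
  rw [show (List.foldl (fun h c => h * 1114112 + (c.toNat : Int)) (0 * 1114112 + (c.toNat : Int)) l)
        = _ from pv_hash_acc l _]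
  ring

theorem pv_hash_snoc (l : List Char) (c : Char) :
    pvHash (l ++ [c]) = pvHash l * 1114112 + (c.toNat : Int) := by
  simp [pvHash, List.foldl_append]

-- the modded fold the port runs computes the exact hash reduced mod 2^61-1
theorem pv_hashMod_eq (l : List Char) :
    pvHashMod l = pvHash l % 2305843009213693951 := by
  have key : ∀ (l : List Char) (x : Int),
      l.foldl (fun h c => (h * 1114112 + (c.toNat : Int)) % 2305843009213693951)
          (x % 2305843009213693951)
        = (l.foldl (fun h c => h * 1114112 + (c.toNat : Int)) x) % 2305843009213693951 := by
    intro l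
    induction l with
    | nil => intro x; simp
    | cons c t ih =>
      intro x
      simp only [List.foldl_cons]
      have e1 : (x % 2305843009213693951) ≡ x [ZMOD (2305843009213693951:Int)] :=
        Int.emod_emod_of_dvd x dvd_rfl
      have hstep : ((x % 2305843009213693951) * 1114112 + (c.toNat : Int)) % 2305843009213693951
          = (x * 1114112 + (c.toNat : Int)) % 2305843009213693951 :=
        (e1.mul_right _).add_right _
      rw [hstep, ih]
  unfold pvHashMod pvHash
  simp only [pv_mod_eq]
  have h0 : (0 : Int) = 0 % 2305843009213693951 := by norm_num
  rw [h0]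
  exact key l 0

-- rolling update: the new window hash from the old one (exact)
theorem pv_roll (l : List Char) (j m : Nat) (hm : 1 ≤ m) (hjm : j + m < l.length) :
    pvHash ((l.drop (j+1)).take m)
      = (pvHash ((l.drop j).take m) - ((l.getD j default).toNat : Int) * 1114112 ^ (m-1)) * 1114112
          + ((l.getD (j+m) default).toNat : Int) := by
  have hj : j < l.length := by omega
  have hjm' : j + m < l.length := hjm
  have hdropj : l.drop j = l[j] :: l.drop (j+1) := List.drop_eq_getElem_cons hj
  obtain ⟨m', rfl⟩ : ∃ m', m = m' + 1 := ⟨m - 1, by omega⟩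
  have hold : (l.drop j).take (m' + 1) = l[j] :: (l.drop (j+1)).take m' := by
    rw [hdropj, List.take_succ_cons]
  have hidx : (l.drop (j+1))[m']? = some l[j + (m' + 1)] := by
    rw [List.getElem?_drop]
    have he : j + 1 + m' = j + (m' + 1) := by omega
    rw [he, List.getElem?_eq_getElem (by omega)]
  have hnew : (l.drop (j+1)).take (m' + 1) = (l.drop (j+1)).take m' ++ [l[j + (m' + 1)]] := by
    rw [List.take_add_one, hidx]
    rfl
  have hwlen : ((l.drop (j+1)).take m').length = m' := by
    simp
    omega
  have hgj : l.getD j default = l[j] := List.getD_eq_getElem l default hj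
  have hgjm : l.getD (j + (m' + 1)) default = l[j + (m' + 1)] := List.getD_eq_getElem l default hjm'
  rw [hold, hnew, pv_hash_cons, pv_hash_snoc, hwlen, hgj, hgjm]
  simp only [Nat.add_sub_cancel]
  ring

-- rolling update, reduced mod 2^61-1 (what the port computes)
theorem pv_roll_mod (l : List Char) (j m : Nat) (hm : 1 ≤ m) (hjm : j + m < l.length) :
    ((pvHash ((l.drop j).take m) % 2305843009213693951
        - ((l.getD j default).toNat : Int) * ((1114112:Int) ^ (m-1) % 2305843009213693951)) * 1114112
        + ((l.getD (j+m) default).toNat : Int)) % 2305843009213693951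
      = pvHash ((l.drop (j+1)).take m) % 2305843009213693951 := by
  rw [pv_roll l j m hm hjm]
  have h1 : pvHash ((l.drop j).take m) % 2305843009213693951
      ≡ pvHash ((l.drop j).take m) [ZMOD (2305843009213693951:Int)] :=
    Int.emod_emod_of_dvd _ dvd_rfl
  have h2 : (1114112:Int) ^ (m-1) % 2305843009213693951
      ≡ (1114112:Int) ^ (m-1) [ZMOD (2305843009213693951:Int)] :=
    Int.emod_emod_of_dvd _ dvd_rfl
  exact ((h1.sub (h2.mul_left _)).mul_right _).add_right _

theorem pv_rkGo_iff (texto p : List Char) (m i : Nat) (hm : 1 ≤ m) (hp : p.length = m)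
    (hmi : m ≤ i) (hin : i ≤ texto.length) :
    pvRkGo texto p (pvHash p % 2305843009213693951)
        ((1114112:Int) ^ (m-1) % 2305843009213693951) m i
        (pvHash ((texto.drop (i-m)).take m) % 2305843009213693951) = true
      ↔ ∃ j, i - m + 1 ≤ j ∧ j + m ≤ texto.length ∧ (texto.drop j).take m = p := by
  obtain ⟨k, hk⟩ : ∃ k, texto.length - i = k := ⟨_, rfl⟩
  induction k generalizing i with
  | zero =>
    have hi : i = texto.length := by omega
    rw [pvRkGo]
    rw [dif_neg (by omega)]
    simp only [Bool.false_eq_true, false_iff]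
    rintro ⟨j, hj1, hj2, -⟩
    omega
  | succ k ih =>
    have hilt : i < texto.length := by omega
    rw [pvRkGo]
    rw [dif_pos hilt]
    simp only [pv_mod_eq]
    have hroll := pv_roll_mod texto (i - m) m hm (by omega)
    have he1 : i - m + m = i := by omega
    have he2 : i - m + 1 = (i + 1) - m := by omega
    rw [he1] at hroll
    by_cases hwin : (texto.drop (i - m + 1)).take m = p
    · have hc : ((((pvHash ((texto.drop (i-m)).take m) % 2305843009213693951
              - ((texto.getD (i - m) default).toNat : Int) * ((1114112:Int) ^ (m-1) % 2305843009213693951)) * 1114112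
              + ((texto.getD i default).toNat : Int)) % 2305843009213693951
            == pvHash p % 2305843009213693951)
          && (((texto.drop (i - m + 1)).take m) == p)) = true := by
        rw [hroll, hwin]
        simp
      rw [if_pos hc]
      refine ⟨fun _ => ?_, fun _ => rfl⟩
      exact ⟨i - m + 1, le_refl _, by omega, hwin⟩
    · have hc2 : (((texto.drop (i - m + 1)).take m) == p) = false := by
        simp [hwin]
      rw [if_neg (by simp [hc2])]
      rw [hroll, he2]
      rw [ih (i + 1) (by omega) (by omega) (by omega)]
      constructor
      · rintro ⟨j, hj1, hj2, hj3⟩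
        exact ⟨j, by omega, hj2, hj3⟩
      · rintro ⟨j, hj1, hj2, hj3⟩
        refine ⟨j, ?_, hj2, hj3⟩
        rcases Nat.eq_or_lt_of_le hj1 with heq | hlt
        · exfalso
          apply hwin
          rw [he2, heq]
          exact hj3
        · omega

-- B's row body decides 'p in texto'
theorem pv_rk_row (texto p : List Char) :
    (if texto.length < p.length then false
     else
       let h0 := pvHashMod (texto.take p.length)
       if h0 == pvHashMod p && (texto.take p.length == p) then true
       else pvRkGo texto p (pvHashMod p)
              (if 0 < p.length then PySem.Int.mod ((1114112:Int) ^ (p.length - 1)) 2305843009213693951 else 0)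
              p.length p.length h0)
      = PySem.Chars.isIn p texto := by
  by_cases hnm : texto.length < p.length
  · rw [if_pos hnm]
    symm
    rw [PySem.Chars.isIn_eq_false_iff]
    intro hinf
    have := hinf.length_le
    omega
  · rw [if_neg hnm]
    have hn : p.length ≤ texto.length := by omega
    have hiff : (∃ j, j + p.length ≤ texto.length ∧ (texto.drop j).take p.length = p) ↔ PySem.Chars.isIn p texto = true := by
      rw [← PySem.Chars.exists_prefix_drop_iff_isIn]
      constructor
      · rintro ⟨j, hj1, hj2⟩
        exact ⟨j, hj2 ▸ List.take_prefix _ _⟩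
      · rintro ⟨j, hpre⟩
        by_cases hjn : j ≤ texto.length
        · have hdl : (texto.drop j).length = texto.length - j := List.length_drop
          have hlen : p.length ≤ texto.length - j := hdl ▸ hpre.length_le
          exact ⟨j, by omega, (List.prefix_iff_eq_take.mp hpre).symm⟩
        · have hnil : texto.drop j = [] := List.drop_eq_nil_of_le (by omega)
          rw [hnil] at hpre
          have hpnil : p = [] := List.prefix_nil.mp hpre
          exact ⟨0, by simp [hpnil], by simp [hpnil]⟩
    by_cases hwin : texto.take p.length = p
    · have hc : (pvHashMod (texto.take p.length) == pvHashMod p && (texto.take p.length == p)) = true := by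
        rw [hwin]
        simp
      rw [if_pos hc]
      refine (hiff.mp ⟨0, by omega, by simpa using hwin⟩).symm
    · have hc2 : (texto.take p.length == p) = false := by simp [hwin]
      rw [if_neg (by simp [hc2])]
      by_cases hm0 : p.length = 0
      · exfalso
        apply hwin
        have hpnil : p = [] := List.eq_nil_of_length_eq_zero hm0
        simp [hpnil]
      · have hm : 1 ≤ p.length := by omega
        rw [if_pos (by omega : 0 < p.length)]
        rw [pv_mod_eq, pv_hashMod_eq, pv_hashMod_eq]
        have hstart : texto.take p.length = (texto.drop (p.length - p.length)).take p.length := by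
          simp
        rw [Bool.eq_iff_iff, hstart,
           pv_rkGo_iff texto p p.length p.length hm rfl le_rfl hn, ← hiff]
        constructor
        · rintro ⟨j, hj1, hj2, hj3⟩
          exact ⟨j, hj2, hj3⟩
        · rintro ⟨j, hj2, hj3⟩
          have hj0 : j ≠ 0 := by
            rintro rfl
            apply hwin
            simpa using hj3
          exact ⟨j, by omega, hj2, hj3⟩

-- ===== VERDICT (by name: the statement is the Claim_ definition above) =====
theorem buscar_secuencia_spec : Claim_equal_buscar_secuencia := by
  intro matriz secuencia _
  unfold Spec_buscar_secuencia buscar_secuencia buscar_secuencia_alt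
  refine List.any_congr rfl (fun fila => ?_)
  rw [pv_join_empty_sep]
  have hfold : fila.foldl (fun acc num => acc ++ PySem.Int.toStr num) ""
       = (fila.map PySem.Int.toStr).foldl (fun a s => a ++ s) "" := by
    rw [List.foldl_map]
  rw [← hfold]
  rw [pv_row_scan]
  simp only [PySem.Str.isIn_eq]
  rw [← pv_rk_row (fila.foldl (fun acc num => acc ++ PySem.Int.toStr num) "").toList secuencia.toList]
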